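-- pv_equiv track=rewrite | github.com/YaniScholtz/Communication-systems | Prac3.py | convolutional_codes_encode_long_sequence
-- ===== SOURCE A (Python) =====
-- from typing import List, Tuple, Union
--
-- BIT_SEQUENCE_TYPE = List[int]
--
-- def convolutional_codes_encode(bit_sequence: BIT_SEQUENCE_TYPE) -> BIT_SEQUENCE_TYPE:
--     """
--     Takes the given sequence of bits and encodes it using convolutional codes. The function returns the encoded sequence.
--     The parameters for the encoder are provided in the practical guide.
--     The sequence of bits can be any length.
--
--     parameters:
--         bit_sequence -> type <class 'list'> : List containing int items which represents the bits for example: [0, 1, 1]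
--
--     returns:
--
--
--         codeword_sequence -> type <class 'list'> : List containing int items which represents the bits for example: [0, 1, 1]
--     """
--
--     codeword_sequence = []
--
--     state_table = {
--         ("00", "0"): ("00", "000"),
--         ("00", "1"): ("10", "111"),
--         ("01", "0"): ("00", "001"),
--         ("01", "1"): ("10", "110"),
--         ("10", "0"): ("01", "010"),
--         ("10", "1"): ("11", "101"),
--         ("11", "0"): ("01", "011"),
--         ("11", "1"): ("11", "100"),
--     }
--
--     current_state = "00"
--
--     for bit in bit_sequence:
--         bit_str = str(bit)
--
--         next_state, output_bits = state_table[(current_state, bit_str)]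
--
--         codeword_sequence.extend([int(b) for b in output_bits])
--
--         current_state = next_state
--
--     return codeword_sequence
--
-- def convolutional_codes_encode_long_sequence(
--     bit_sequence: BIT_SEQUENCE_TYPE,
-- ) -> BIT_SEQUENCE_TYPE:
--     """
--     Takes the given sequence of bits and encodes it using convolutional codes. The function returns the encoded sequence.
--     The parameters for the encoder are provided in the practical guide.
--
--     The sequence of bits should be broken up into smaller sequences, zeros should be appended to the end of each sequence, and then encoded using convolutional_codes_encode
--     to yield multiple sequences of length Nc = 300. All the encoded sequences should then be combined to form a single larger sequence.
--
--     parameters: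
--         bit_sequence -> type <class 'list'> : List containing int items which represents the bits for example: [0, 1, 1]
--         generator_matrix -> type <class 'list'> : A list containing lists, making a 2D array representing a matrix. The first index refers to the row and the second index refers to the column.
--           Example (example 2 from lecture notes ):
--             G = [
--                 [1.0, 0.0, 0.0, 0.0, 0.0, 0.0, 0.0, 0.0, 1.0, 1.0, 0.0, 1.0, 0.0, 0.0],
--                 [0.0, 1.0, 0.0, 0.0, 0.0, 0.0, 0.0, 0.0, 0.0, 0.0, 1.0, 0.0, 1.0, 0.0],
--                 [0.0, 0.0, 1.0, 0.0, 0.0, 0.0, 0.0, 0.0, 1.0, 1.0, 0.0, 0.0, 1.0, 1.0],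
--                 [0.0, 0.0, 0.0, 1.0, 0.0, 0.0, 0.0, 0.0, 1.0, 0.0, 1.0, 1.0, 0.0, 1.0],
--                 [0.0, 0.0, 0.0, 0.0, 1.0, 0.0, 0.0, 0.0, 0.0, 1.0, 0.0, 0.0, 1.0, 0.0],
--                 [0.0, 0.0, 0.0, 0.0, 0.0, 1.0, 0.0, 0.0, 0.0, 0.0, 1.0, 1.0, 1.0, 0.0],
--                 [0.0, 0.0, 0.0, 0.0, 0.0, 0.0, 1.0, 0.0, 1.0, 0.0, 0.0, 0.0, 0.0, 1.0],
--                 [0.0, 0.0, 0.0, 0.0, 0.0, 0.0, 0.0, 1.0, 0.0, 1.0, 1.0, 1.0, 0.0, 1.0],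
--             ]
--
--     returns:
--         codeword_sequence -> type <class 'list'> : List containing int items which represents the bits for example: [0, 1, 1]
--     """
--
--     chunk_size = 98
--     codeword_sequence = []
--
--     for i in range(0, len(bit_sequence), chunk_size):
--         chunk = bit_sequence[i : i + chunk_size]
--         chunk = chunk + [0, 0]
--         encoded_chunk = convolutional_codes_encode(chunk)
--         codeword_sequence.extend(encoded_chunk)
--
--     return codeword_sequence
-- ===== SOURCE B (Python) =====
-- def convolutional_codes_encode_long_sequence(bit_sequence):
--     # Streaming one-pass encoder: parity formulas replace the state table,
--     # chunking is fused in via a counter with an inline zero-flush + state reset.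
--     for b in bit_sequence:
--         if b != 0 and b != 1:
--             raise ValueError("bit_sequence must contain only bits 0 and 1")
--     out = []
--     s1 = s2 = 0
--     count = 0
--     for b in bit_sequence:
--         out += [b, b ^ s1, b ^ s2]
--         s1, s2 = b, s1
--         count += 1
--         if count == 98:
--             out += [0, s1, s2, 0, 0, s1]
--             s1 = s2 = 0
--             count = 0
--     if count > 0:
--         out += [0, s1, s2, 0, 0, s1]
--     return out
-- ===== Notes on version B (the rewrite author's own statement) =====
-- stated objective: alternative
-- what changed: A slices the input into 98-bit chunks and re-runs a table-driven string-state encoder on each padded chunk; B is a single streaming pass using XOR parity formulas with two integer state bits and a counter that inlines the zero-flush and state reset at each chunk boundary (B validates up front, raising ValueError where A's table lookup raises KeyError).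
import Mathlib
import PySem

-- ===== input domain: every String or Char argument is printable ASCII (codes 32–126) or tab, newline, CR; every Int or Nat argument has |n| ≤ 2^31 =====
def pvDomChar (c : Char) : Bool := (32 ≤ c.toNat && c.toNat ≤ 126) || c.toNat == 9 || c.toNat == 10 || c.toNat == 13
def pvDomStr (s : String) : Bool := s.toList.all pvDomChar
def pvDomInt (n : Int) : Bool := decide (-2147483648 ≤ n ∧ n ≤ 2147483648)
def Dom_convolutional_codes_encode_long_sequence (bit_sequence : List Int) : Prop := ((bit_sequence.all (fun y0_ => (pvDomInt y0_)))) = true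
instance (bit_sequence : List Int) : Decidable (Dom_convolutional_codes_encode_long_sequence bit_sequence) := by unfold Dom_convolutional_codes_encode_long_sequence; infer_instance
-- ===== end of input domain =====

-- B fuses A's per-98-bit chunking and its table-driven encoder into one streaming pass
-- (XOR parity formulas, a bit counter, an inline zero-flush); same return value.

-- ===== PORT A =====
-- the literal state_table dict of A, as a lookup (none = KeyError)
def pvStateTable (s b : String) : Option (String × String) :=
  if s = "00" ∧ b = "0" then some ("00", "000")
  else if s = "00" ∧ b = "1" then some ("10", "111")
  else if s = "01" ∧ b = "0" then some ("00", "001")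
  else if s = "01" ∧ b = "1" then some ("10", "110")
  else if s = "10" ∧ b = "0" then some ("01", "010")
  else if s = "10" ∧ b = "1" then some ("11", "101")
  else if s = "11" ∧ b = "0" then some ("01", "011")
  else if s = "11" ∧ b = "1" then some ("11", "100")
  else none

-- one iteration of A's inner for-loop; the none branch is Python's KeyError (excluded by Pre_)
def encodeStep (st : List Int × String) (bit : Int) : List Int × String :=
  let bit_str := PySem.Int.toStr bit
  match pvStateTable st.2 bit_str with
  | some (next_state, output_bits) =>
      (st.1 ++ output_bits.toList.map (fun b => (PySem.Int.ofStr? (String.mk [b])).getD 0), next_state)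
  | none => (st.1, st.2)

def convolutional_codes_encode (bit_sequence : List Int) : List Int :=
  (bit_sequence.foldl encodeStep ([], "00")).1

def convolutional_codes_encode_long_sequence (bit_sequence : List Int) : List Int :=
  (PySem.List.pyRange 0 (bit_sequence.length : Int) 98).foldl
    (fun codeword_sequence i =>
      codeword_sequence ++
        convolutional_codes_encode
          (PySem.List.slice bit_sequence (some i) (some (i + 98)) ++ [0, 0]))
    []

-- ===== PORT B =====
-- one iteration of B's single streaming loop; state = (out, s1, s2, count).
-- (Source B's up-front ValueError validation of non-0/1 elements has no return value to port;
-- exactly those inputs are excluded by Pre_ below.)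
def altStep (st : List Int × Int × Int × Int) (b : Int) : List Int × Int × Int × Int :=
  let out := st.1 ++ [b, PySem.Int.bxor b st.2.1, PySem.Int.bxor b st.2.2.1]
  let s1 := b
  let s2 := st.2.1
  let count := st.2.2.2 + 1
  if count = 98 then (out ++ [0, s1, s2, 0, 0, s1], 0, 0, 0)
  else (out, s1, s2, count)

def convolutional_codes_encode_long_sequence_alt (bit_sequence : List Int) : List Int :=
  let r := bit_sequence.foldl altStep ([], 0, 0, 0)
  if r.2.2.2 > 0 then r.1 ++ [0, r.2.1, r.2.2.1, 0, 0, r.2.1] else r.1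

-- ===== PRECONDITION & SPEC =====
-- Pre_ excludes exactly the inputs on which both Pythons raise (A: KeyError from the state
-- table, B: ValueError from its explicit validation): any element other than 0 or 1.
def Pre_convolutional_codes_encode_long_sequence (bit_sequence : List Int) : Prop :=
  ∀ b ∈ bit_sequence, b = 0 ∨ b = 1
instance (bit_sequence : List Int) : Decidable (Pre_convolutional_codes_encode_long_sequence bit_sequence) := by
  unfold Pre_convolutional_codes_encode_long_sequence; infer_instance

def pvWitness_convolutional_codes_encode_long_sequence : List Int := [0, 1, 1, 0, 1]

def Spec_convolutional_codes_encode_long_sequence (bit_sequence : List Int) (out : List Int) : Prop := out = convolutional_codes_encode_long_sequence_alt bit_sequence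
instance (bit_sequence : List Int) (out : List Int) : Decidable (Spec_convolutional_codes_encode_long_sequence bit_sequence out) := by unfold Spec_convolutional_codes_encode_long_sequence; infer_instance

-- ===== CLAIM (what is proved, stated in full; the proofs are below) =====
def Claim_equal_convolutional_codes_encode_long_sequence : Prop := ∀ (bit_sequence : List Int), Dom_convolutional_codes_encode_long_sequence bit_sequence → Pre_convolutional_codes_encode_long_sequence bit_sequence → Spec_convolutional_codes_encode_long_sequence bit_sequence (convolutional_codes_encode_long_sequence bit_sequence)

-- ===== LEMMAS AND PROOFS =====

-- streaming specification both ports are reduced to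
def specEnc : List Int → Int → Int → List Int
  | [], _, _ => []
  | b :: r, s1, s2 => b :: PySem.Int.bxor b s1 :: PySem.Int.bxor b s2 :: specEnc r b s1

def specState (bits : List Int) (s : Int × Int) : Int × Int :=
  bits.foldl (fun s b => (b, s.1)) s

def specLong (t : List Int) : List Int :=
  if h : t = [] then []
  else specEnc (t.take 98 ++ [0, 0]) 0 0 ++ specLong (t.drop 98)
termination_by t.length
decreasing_by
  have : 0 < t.length := List.length_pos_iff.mpr h
  simp
  omega

lemma specState_cons (b : Int) (r : List Int) (s : Int × Int) :
    specState (b :: r) s = specState r (b, s.1) := by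
  simp [specState]

lemma specEnc_append (xs ys : List Int) (s1 s2 : Int) :
    specEnc (xs ++ ys) s1 s2 =
      specEnc xs s1 s2 ++ specEnc ys (specState xs (s1, s2)).1 (specState xs (s1, s2)).2 := by
  induction xs generalizing s1 s2 with
  | nil => simp [specEnc, specState]
  | cons b r ih =>
    simp only [List.cons_append, specEnc]
    rw [ih, specState_cons]

-- A's state string for machine state (s1, s2)
def stateStr (s1 s2 : Int) : String :=
  if s1 = 0 then (if s2 = 0 then "00" else "01")
  else (if s2 = 0 then "10" else "11")

lemma encodeStep_eq (acc : List Int) (s1 s2 b : Int)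
    (hb : b = 0 ∨ b = 1) (h1 : s1 = 0 ∨ s1 = 1) (h2 : s2 = 0 ∨ s2 = 1) :
    encodeStep (acc, stateStr s1 s2) b =
      (acc ++ [b, PySem.Int.bxor b s1, PySem.Int.bxor b s2], stateStr b s1) := by
  rcases hb with rfl | rfl <;> rcases h1 with rfl | rfl <;> rcases h2 with rfl | rfl <;> rfl

lemma encA_eq (bits : List Int) : ∀ (acc : List Int) (s1 s2 : Int),
    (∀ b ∈ bits, b = 0 ∨ b = 1) → (s1 = 0 ∨ s1 = 1) → (s2 = 0 ∨ s2 = 1) →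
    bits.foldl encodeStep (acc, stateStr s1 s2) =
      (acc ++ specEnc bits s1 s2,
       stateStr (specState bits (s1, s2)).1 (specState bits (s1, s2)).2) := by
  induction bits with
  | nil => intro acc s1 s2 _ _ _; simp [specEnc, specState]
  | cons b r ih =>
    intro acc s1 s2 hb hs1 hs2
    have hb0 : b = 0 ∨ b = 1 := hb b (by simp)
    have hr : ∀ x ∈ r, x = 0 ∨ x = 1 := fun x hx => hb x (by simp [hx])
    rw [List.foldl_cons, encodeStep_eq acc s1 s2 b hb0 hs1 hs2,
        ih _ b s1 hr hb0 hs1, specState_cons]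
    simp [specEnc]

lemma enc_chunk (bits : List Int) (h : ∀ b ∈ bits, b = 0 ∨ b = 1) :
    convolutional_codes_encode bits = specEnc bits 0 0 := by
  unfold convolutional_codes_encode
  rw [show ("00" : String) = stateStr 0 0 from rfl,
      encA_eq bits [] 0 0 h (Or.inl rfl) (Or.inl rfl)]
  simp

-- pyRange with step 98: nil and cons forms
lemma pyRange98_nil (a b : Int) (h : b ≤ a) : PySem.List.pyRange a b 98 = [] := by
  rw [PySem.List.pyRange_of_pos a b (by norm_num)]
  simp [show ¬ a < b by omega]

lemma pyRange98_cons (a b : Int) (h : a < b) :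
    PySem.List.pyRange a b 98 = a :: PySem.List.pyRange (a + 98) b 98 := by
  rw [PySem.List.pyRange_of_pos a b (by norm_num),
      PySem.List.pyRange_of_pos (a + 98) b (by norm_num)]
  by_cases h2 : a + 98 < b
  · have he : ((b - a + 98 - 1) / 98).toNat = ((b - (a + 98) + 98 - 1) / 98).toNat + 1 := by
      omega
    rw [if_pos h, if_pos h2, he, List.range_succ_eq_map]
    simp only [List.map_cons, List.map_map]
    congr 1
    · simp
    · refine List.map_congr_left fun k _ => ?_
      simp only [Function.comp]
      push_cast
      ring
  · have he : ((b - a + 98 - 1) / 98).toNat = 1 := by omega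
    rw [if_pos h, if_neg h2, he]
    simp

-- A's outer loop, processed chunkwise
lemma A_loop_fuel (n : Nat) : ∀ (t : List Int), t.length ≤ n → ∀ (bs : List Int) (j : Nat),
    bs.drop j = t → (∀ b ∈ bs, b = 0 ∨ b = 1) →
    (PySem.List.pyRange (j : Int) (bs.length : Int) 98).flatMap
      (fun i => convolutional_codes_encode
          (PySem.List.slice bs (some i) (some (i + 98)) ++ [0, 0]))
    = specLong t := by
  induction n with
  | zero =>
    intro t hn bs j hdrop hbits
    have ht : t = [] := List.eq_nil_of_length_eq_zero (by omega)
    subst ht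
    have hj : (bs.length : Int) ≤ (j : Int) := by
      have := List.drop_eq_nil_iff.mp hdrop
      exact_mod_cast this
    rw [pyRange98_nil _ _ hj, specLong]
    simp
  | succ n ih => ?_
  intro t hn bs j hdrop hbits
  rcases eq_or_ne t [] with rfl | hne
  · have hj : (bs.length : Int) ≤ (j : Int) := by
      have := List.drop_eq_nil_iff.mp hdrop
      exact_mod_cast this
    rw [pyRange98_nil _ _ hj, specLong]
    simp
  · have hlen : 0 < t.length := List.length_pos_iff.mpr hne
    have hjn : j < bs.length := by
      by_contra hc
      exact hne (hdrop ▸ List.drop_eq_nil_iff.mpr (by omega))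
    rw [pyRange98_cons _ _ (by exact_mod_cast hjn), List.flatMap_cons]
    have hslice : PySem.List.slice bs (some (j : Int)) (some ((j : Int) + 98)) = t.take 98 := by
      rw [show ((98 : Int)) = ((98 : Nat) : Int) from rfl, PySem.List.slice_natCast_add, hdrop]
    have htail : (PySem.List.pyRange ((j : Int) + 98) (bs.length : Int) 98).flatMap
        (fun i => convolutional_codes_encode
            (PySem.List.slice bs (some i) (some (i + 98)) ++ [0, 0]))
        = specLong (t.drop 98) := by
      have hc : ((j : Int) + 98) = ((j + 98 : Nat) : Int) := by push_cast; ring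
      rw [hc]
      refine ih (t.drop 98) (by simp; omega) bs (j + 98) ?_ hbits
      rw [← hdrop, List.drop_drop]
      try congr 1
      try omega
    rw [hslice, htail, enc_chunk _ ?_]
    · conv_rhs => rw [specLong]
      rw [dif_neg hne]
    · intro b hbm
      rcases List.mem_append.mp hbm with hmem | hmem
      · exact hbits b (List.mem_of_mem_drop (hdrop ▸ List.mem_of_mem_take hmem))
      · simp at hmem
        exact Or.inl hmem

-- B's loop lemmas
lemma B_acc (bits : List Int) : ∀ (out : List Int) (s1 s2 c : Int),
    bits.foldl altStep (out, s1, s2, c) =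
      (out ++ (bits.foldl altStep ([], s1, s2, c)).1, (bits.foldl altStep ([], s1, s2, c)).2) := by
  induction bits with
  | nil => intro out s1 s2 c; simp
  | cons b r ih =>
    intro out s1 s2 c
    rw [List.foldl_cons, List.foldl_cons]
    by_cases h : c + 1 = 98
    · rw [show altStep (out, s1, s2, c) b
            = ((out ++ [b, PySem.Int.bxor b s1, PySem.Int.bxor b s2]) ++ [0, b, s1, 0, 0, b],
               0, 0, 0) from by simp [altStep, h],
          show altStep ([], s1, s2, c) b
            = (([] ++ [b, PySem.Int.bxor b s1, PySem.Int.bxor b s2]) ++ [0, b, s1, 0, 0, b],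
               0, 0, 0) from by simp [altStep, h],
          ih ((out ++ [b, PySem.Int.bxor b s1, PySem.Int.bxor b s2]) ++ [0, b, s1, 0, 0, b]) 0 0 0,
          ih (([] ++ [b, PySem.Int.bxor b s1, PySem.Int.bxor b s2]) ++ [0, b, s1, 0, 0, b]) 0 0 0]
      simp
    · rw [show altStep (out, s1, s2, c) b
            = (out ++ [b, PySem.Int.bxor b s1, PySem.Int.bxor b s2], b, s1, c + 1)
            from by simp [altStep, h],
          show altStep ([], s1, s2, c) b
            = ([] ++ [b, PySem.Int.bxor b s1, PySem.Int.bxor b s2], b, s1, c + 1)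
            from by simp [altStep, h],
          ih (out ++ [b, PySem.Int.bxor b s1, PySem.Int.bxor b s2]) b s1 (c + 1),
          ih ([] ++ [b, PySem.Int.bxor b s1, PySem.Int.bxor b s2]) b s1 (c + 1)]
      simp

lemma B_partial (bits : List Int) : ∀ (out : List Int) (s1 s2 c : Int),
    c + bits.length < 98 →
    bits.foldl altStep (out, s1, s2, c) =
      (out ++ specEnc bits s1 s2,
       (specState bits (s1, s2)).1, (specState bits (s1, s2)).2, c + bits.length) := by
  induction bits with
  | nil => intro out s1 s2 c _; simp [specEnc, specState]
  | cons b r ih =>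
    intro out s1 s2 c hc
    simp only [List.length_cons] at hc
    have hne : ¬ ((c + 1 : Int) = 98) := by push_cast at hc ⊢; omega
    rw [List.foldl_cons,
        show altStep (out, s1, s2, c) b
          = (out ++ [b, PySem.Int.bxor b s1, PySem.Int.bxor b s2], b, s1, c + 1)
          from by simp [altStep, hne],
        ih _ b s1 (c + 1) (by push_cast at hc ⊢; omega), specState_cons]
    have hlist : (out ++ [b, PySem.Int.bxor b s1, PySem.Int.bxor b s2]) ++ specEnc r b s1
        = out ++ specEnc (b :: r) s1 s2 := by simp [specEnc]
    have hcnt : c + 1 + (r.length : Int) = c + (((b :: r).length : Nat) : Int) := by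
      simp only [List.length_cons]; push_cast; omega
    rw [hlist, hcnt]

lemma specEnc_flush (xs : List Int) (s1 s2 : Int) :
    specEnc (xs ++ [0, 0]) s1 s2 =
      specEnc xs s1 s2 ++
        [0, (specState xs (s1, s2)).1, (specState xs (s1, s2)).2, 0, 0,
         (specState xs (s1, s2)).1] := by
  rw [specEnc_append]
  have h0 : ∀ x : Int, PySem.Int.bxor 0 x = x := fun x => by
    rw [PySem.Int.bxor_comm]; simp
  congr 1
  simp [specEnc, specState, h0]

lemma B_main_fuel (n : Nat) : ∀ (t : List Int), t.length ≤ n →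
    convolutional_codes_encode_long_sequence_alt t = specLong t := by
  induction n with
  | zero =>
    intro t hn
    have ht : t = [] := List.eq_nil_of_length_eq_zero (by omega)
    subst ht
    simp [convolutional_codes_encode_long_sequence_alt, specLong]
  | succ n ih => ?_
  intro t hn
  rcases eq_or_ne t [] with rfl | hne
  · simp [convolutional_codes_encode_long_sequence_alt, specLong]
  · have hlen : 0 < t.length := List.length_pos_iff.mpr hne
    unfold convolutional_codes_encode_long_sequence_alt
    by_cases hsmall : t.length < 98
    · rw [B_partial t [] 0 0 0 (by omega)]
      have hpos : ((0 : Int) + t.length) > 0 := by omega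
      rw [if_pos hpos]
      conv_rhs => rw [specLong]
      rw [dif_neg hne, List.take_of_length_le (by omega),
          List.drop_eq_nil_of_le (by omega), specLong, dif_pos rfl,
          specEnc_flush]
      simp
    · -- at least 98 elements: the first chunk flushes inside the loop
      have h97 : 97 < t.length := by omega
      have hdrop97 : t.drop 97 = t[97] :: t.drop 98 := List.drop_eq_getElem_cons h97
      have hsplit : t = t.take 97 ++ t[97] :: t.drop 98 := by
        conv_lhs => rw [← List.take_append_drop 97 t, hdrop97]
      set b := t[97] with hb
      have hlen97 : (t.take 97).length = 97 := by simp; omega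
      conv_lhs => rw [hsplit]
      rw [List.foldl_append, B_partial (t.take 97) [] 0 0 0 (by rw [hlen97]; norm_num),
          List.foldl_cons]
      set u := specState (t.take 97) ((0 : Int), (0 : Int)) with hu97
      rw [show altStep (([] ++ specEnc (t.take 97) 0 0), u.1, u.2, 0 + ((t.take 97).length : Int)) b
            = ((([] ++ specEnc (t.take 97) 0 0)
                 ++ [b, PySem.Int.bxor b u.1, PySem.Int.bxor b u.2]) ++ [0, b, u.1, 0, 0, b],
               0, 0, 0)
            from by rw [hlen97]; norm_num [altStep], B_acc]
      have hrec := ih (t.drop 98) (by simp; omega)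
      unfold convolutional_codes_encode_long_sequence_alt at hrec
      conv_rhs => rw [specLong]
      rw [dif_neg hne, ← hrec]
      have htake : t.take 98 = t.take 97 ++ [b] := by
        rw [show (98 : Nat) = 97 + 1 from rfl, List.take_succ]
        simp [List.getElem?_eq_getElem h97, hb]
      rw [htake, specEnc_flush, specEnc_append]
      have hu : specState (t.take 97 ++ [b]) ((0 : Int), (0 : Int)) = (b, u.1) := by
        show List.foldl _ ((0 : Int), (0 : Int)) (t.take 97 ++ [b]) = _
        rw [List.foldl_append]
        rfl
      rw [hu]
      simp only [specEnc, List.nil_append]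
      by_cases hpos : (List.foldl altStep ([], 0, 0, 0) (t.drop 98)).2.2.2 > 0 <;>
        simp [hpos, List.append_assoc, ← hu97]

lemma B_main (t : List Int) : convolutional_codes_encode_long_sequence_alt t = specLong t :=
  B_main_fuel t.length t le_rfl

-- ===== VERDICT (by name: the statement is the Claim_ definition above) =====
theorem convolutional_codes_encode_long_sequence_spec : Claim_equal_convolutional_codes_encode_long_sequence := by
  intro bs _ hpre
  unfold Spec_convolutional_codes_encode_long_sequence
  rw [B_main]
  have h := A_loop_fuel bs.length bs le_rfl bs 0 (by simp) hpre
  unfold convolutional_codes_encode_long_sequence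
  rw [PySem.List.foldl_append_eq_flatMap, List.nil_append]
  exact_mod_cast h
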